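-- pv_equiv track=rewrite | github.com/boboalex/LeetcodeExercise | other_10.py | reOrderCharacters
-- ===== SOURCE A (Python) =====
-- def reOrderCharacters(character_list):
--     lowers = 0
--     for i in range(len(character_list)):
--         if character_list[i] > "Z":
--             j = i
--             while j > lowers:
--                 character_list[j], character_list[j - 1] = character_list[j - 1], character_list[j]
--                 j -= 1
--             lowers += 1
--     return character_list
-- ===== SOURCE B (Python) =====
-- def reOrderCharacters(character_list):
--     # stable partition via two comprehensions; slice assignment keeps the
--     # in-place mutation and object identity of the original
--     character_list[:] = [c for c in character_list if c > "Z"] + \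
--                         [c for c in character_list if not c > "Z"]
--     return character_list
-- ===== Notes on version B (the rewrite author's own statement) =====
-- stated objective: simpler
-- what changed: Replaces the insertion-style bubbling of each lowercase element leftward with a stable partition built from two list comprehensions assigned back in place.
import Mathlib
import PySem

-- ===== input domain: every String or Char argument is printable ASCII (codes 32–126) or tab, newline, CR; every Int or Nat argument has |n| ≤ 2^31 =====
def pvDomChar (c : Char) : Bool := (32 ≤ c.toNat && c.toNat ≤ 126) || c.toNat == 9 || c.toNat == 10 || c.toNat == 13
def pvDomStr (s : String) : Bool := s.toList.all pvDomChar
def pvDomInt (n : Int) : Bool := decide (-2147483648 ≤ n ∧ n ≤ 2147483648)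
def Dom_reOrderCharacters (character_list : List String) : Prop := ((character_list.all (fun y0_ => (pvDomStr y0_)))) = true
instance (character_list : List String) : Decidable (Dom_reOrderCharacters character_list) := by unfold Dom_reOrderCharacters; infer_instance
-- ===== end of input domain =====

-- B replaces A's in-place bubbling with a stable partition built from two
-- comprehensions (objective: simpler). A and B both mutate the argument list in
-- place in Python; the equivalence proved here is about the RETURN value (which is that
-- same list in both).

-- ===== PORT A =====
-- the parallel assignment character_list[j], character_list[j-1] = character_list[j-1], character_list[j]
-- (indices are always in range when A executes it, so getD's default is never used; exact there)
def pvSwapAdj (l : List String) (j : Nat) : List String :=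
  (l.set j (l.getD (j - 1) "")).set (j - 1) (l.getD j "")

-- the inner 'while j > lowers' loop
def pvBubble (l : List String) (lowers j : Nat) : List String :=
  if _h : j > lowers then pvBubble (pvSwapAdj l j) lowers (j - 1) else l
termination_by j - lowers
decreasing_by omega

def reOrderCharacters (character_list : List String) : List String :=
  ((List.range character_list.length).foldl
    (fun (s : List String × Nat) i =>
      if "Z" < s.1.getD i "" then (pvBubble s.1 s.2 i, s.2 + 1) else s)
    (character_list, 0)).1

-- ===== PORT B =====
def reOrderCharacters_alt (character_list : List String) : List String :=
  character_list.filter (fun c => decide ("Z" < c)) ++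
  character_list.filter (fun c => !decide ("Z" < c))

-- ===== PRECONDITION & SPEC =====
def Spec_reOrderCharacters (character_list : List String) (out : List String) : Prop := out = reOrderCharacters_alt character_list
instance (character_list : List String) (out : List String) : Decidable (Spec_reOrderCharacters character_list out) := by unfold Spec_reOrderCharacters; infer_instance

-- ===== CLAIM (what is proved, stated in full; the proofs are below) =====
def Claim_equal_reOrderCharacters : Prop := ∀ (character_list : List String), Dom_reOrderCharacters character_list → Spec_reOrderCharacters character_list (reOrderCharacters character_list)

-- ===== LEMMAS AND PROOFS =====

theorem pv_getD_at_len (A : List String) (r : String) (B : List String) (d : String) :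
    (A ++ r :: B).getD A.length d = r := by
  induction A with
  | nil => rfl
  | cons x A ih => simpa using ih

theorem pvSwapAdj_spec (A : List String) (a b : String) (B : List String) :
    pvSwapAdj (A ++ a :: b :: B) (A.length + 1) = A ++ b :: a :: B := by
  induction A with
  | nil => rfl
  | cons x A ih =>
      simp only [pvSwapAdj, List.cons_append, List.length_cons,
        Nat.add_sub_cancel, List.getD_cons_succ, List.set_cons_succ] at *
      have h1 : A.length + 1 - 1 = A.length := by omega
      simpa [h1, pvSwapAdj] using ih

theorem pvBubble_spec (F : List String) : ∀ (T : List String) (r : String) (R : List String),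
    pvBubble (T ++ F ++ r :: R) T.length (T.length + F.length) = T ++ r :: F ++ R := by
  induction F using List.reverseRecOn with
  | nil =>
      intro T r R
      rw [pvBubble]
      simp
  | append_singleton F f ih =>
      intro T r R
      rw [pvBubble]
      have hgt : T.length + (F ++ [f]).length > T.length := by simp
      simp only [hgt, dite_true]
      have e1 : T ++ (F ++ [f]) ++ r :: R = (T ++ F) ++ f :: r :: R := by simp
      have e2 : T.length + (F ++ [f]).length = (T ++ F).length + 1 := by
        simp only [List.length_append, List.length_cons, List.length_nil]; omega
      rw [e1, e2, pvSwapAdj_spec]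
      have e3 : (T ++ F).length + 1 - 1 = T.length + F.length := by simp
      have e4 : (T ++ F) ++ r :: f :: R = T ++ F ++ r :: (f :: R) := by simp
      rw [e3, e4, ih T r (f :: R)]
      simp

theorem pv_inv (R : List String) : ∀ (T F : List String),
    (List.range' (T.length + F.length) R.length).foldl
      (fun (s : List String × Nat) i =>
        if "Z" < s.1.getD i "" then (pvBubble s.1 s.2 i, s.2 + 1) else s)
      (T ++ F ++ R, T.length)
    = (T ++ R.filter (fun c => decide ("Z" < c)) ++
       (F ++ R.filter (fun c => !decide ("Z" < c))),
       T.length + (R.filter (fun c => decide ("Z" < c))).length) := by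
  induction R with
  | nil => intro T F; simp
  | cons r R ih =>
      intro T F
      simp only [List.length_cons, List.range'_succ, List.foldl_cons]
      have hget : (T ++ F ++ r :: R).getD (T.length + F.length) "" = r := by
        have : T ++ F ++ r :: R = (T ++ F) ++ r :: R := by simp
        rw [this]
        simpa using pv_getD_at_len (T ++ F) r R ""
      by_cases hp : "Z" < r
      · simp only [hget, hp, if_true]
        have hb : pvBubble (T ++ F ++ r :: R) T.length (T.length + F.length)
            = T ++ r :: F ++ R := pvBubble_spec F T r R
        have e1 : T ++ r :: F ++ R = (T ++ [r]) ++ F ++ R := by simp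
        have e2 : T.length + 1 = (T ++ [r]).length := by simp
        have e3 : T.length + F.length + 1 = (T ++ [r]).length + F.length := by
          simp only [List.length_append, List.length_cons, List.length_nil]; omega
        have hpt : decide ("Z" < r) = true := decide_eq_true hp
        rw [hb, e1, e2, e3, ih (T ++ [r]) F, List.filter_cons, List.filter_cons]
        simp only [hpt, Bool.not_true, if_true]
        simp
        omega
      · simp only [hget, hp, if_false]
        have e1 : T ++ F ++ r :: R = T ++ (F ++ [r]) ++ R := by simp
        have e3 : T.length + F.length + 1 = T.length + (F ++ [r]).length := by
          simp only [List.length_append, List.length_cons, List.length_nil]; omega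
        have hpf : decide ("Z" < r) = false := decide_eq_false hp
        rw [e1, e3, ih T (F ++ [r]), List.filter_cons, List.filter_cons]
        simp only [hpf, Bool.not_false, if_true]
        simp

-- ===== VERDICT (by name: the statement is the Claim_ definition above) =====
theorem reOrderCharacters_spec : Claim_equal_reOrderCharacters := by
  intro cl _
  unfold Spec_reOrderCharacters reOrderCharacters reOrderCharacters_alt
  have h := pv_inv cl [] []
  simp only [List.nil_append, List.append_nil, List.length_nil, Nat.zero_add] at h
  rw [List.range_eq_range', h]
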